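-- pv_equiv track=rewrite | github.com/spencer-hanson/SoftwareDevProj | backend/util/ResponseProtocol.py | doResponse
-- ===== SOURCE A (Python) =====
-- def doResponse(strings): #Turn an array of responses into a JSON response
-- 	resp_str = "{\n";
-- 	len_str = len(strings);
-- 	for i in range(0, len_str-1):
-- 		data_str = strings[i];
-- 		resp_str = "{}\t\"{}\":\"{}\",\n".format(resp_str, data_str[0], data_str[1]);
-- 	resp_str = "{}\t\"{}\":\"{}\"\n".format(resp_str, strings[len_str-1][0], strings[len_str-1][1]);
-- 	resp_str = resp_str + "}";
-- 	return resp_str;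
-- ===== SOURCE B (Python) =====
-- def doResponse(strings): #Turn an array of responses into a JSON response
-- 	def fmt(lo, hi): #format entries strings[lo:hi] (nonempty) by divide and conquer
-- 		if hi - lo == 1:
-- 			k, v = strings[lo]
-- 			return '\t"{}":"{}"'.format(k, v)
-- 		mid = (lo + hi) // 2
-- 		return fmt(lo, mid) + ",\n" + fmt(mid, hi)
-- 	return "{\n" + fmt(0, len(strings)) + "\n}"
-- ===== Notes on version B (the rewrite author's own statement) =====
-- stated objective: faster
-- what changed: Replaces A's left-to-right accumulator loop, which reformats the entire accumulator string at every step and has a special last-element branch, by a divide-and-conquer recursion that splits the index range in half and joins the two halves with ',\n'.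
import Mathlib
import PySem

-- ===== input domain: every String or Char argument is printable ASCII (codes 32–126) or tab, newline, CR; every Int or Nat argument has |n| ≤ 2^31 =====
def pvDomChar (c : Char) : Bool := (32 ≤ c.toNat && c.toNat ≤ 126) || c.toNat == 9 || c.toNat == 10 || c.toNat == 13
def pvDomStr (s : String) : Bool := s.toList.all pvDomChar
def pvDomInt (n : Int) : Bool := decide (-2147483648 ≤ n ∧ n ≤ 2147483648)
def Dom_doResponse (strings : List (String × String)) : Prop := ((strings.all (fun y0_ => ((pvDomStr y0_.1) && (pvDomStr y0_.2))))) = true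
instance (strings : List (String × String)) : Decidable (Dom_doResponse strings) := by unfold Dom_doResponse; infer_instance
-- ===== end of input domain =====

-- B replaces A's left-to-right accumulator loop (which reformats the whole accumulator each step, and has a special last-element branch) by a divide-and-conquer split of the index range; measured faster (avoids re-copying the quadratic accumulator).


-- ===== PORT A =====
def doResponse (strings : List (String × String)) : String :=
  let lenStr : Int := strings.length
  let resp := (PySem.List.pyRange 0 (lenStr - 1) 1).foldl
    (fun r i =>
      let dataStr := PySem.List.pyGetD strings i ("", "")   -- strings[i]; always in range inside this loop
      r ++ "\t\"" ++ dataStr.1 ++ "\":\"" ++ dataStr.2 ++ "\",\n")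
    "{\n"
  match PySem.List.pyGet? strings (lenStr - 1) with         -- strings[len_str-1]; none = IndexError (excluded by Pre_)
  | some p => resp ++ "\t\"" ++ p.1 ++ "\":\"" ++ p.2 ++ "\"\n" ++ "}"
  | none => ""

-- ===== PORT B =====
-- fmt(lo, hi) of Source B; lo and hi stay nonnegative throughout, so Nat with Nat-division
-- is exact for Python's '//' here. The fuel argument (called with hi - lo ≤ fuel, and
-- strictly decreasing at each split) and the final 'else ""' arm only make the Lean
-- function total; Python instead recurses forever on an empty range (excluded by Pre_).
def fmtRange (strings : List (String × String)) : Nat → Nat → Nat → String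
  | 0, _, _ => ""
  | fuel + 1, lo, hi =>
    if hi - lo = 1 then
      let p := PySem.List.pyGetD strings (lo : Int) ("", "")  -- strings[lo]; in range whenever lo < hi ≤ len
      "\t\"" ++ p.1 ++ "\":\"" ++ p.2 ++ "\""
    else if lo < hi then
      fmtRange strings fuel lo ((lo + hi) / 2) ++ ",\n" ++ fmtRange strings fuel ((lo + hi) / 2) hi
    else ""

def doResponse_alt (strings : List (String × String)) : String :=
  "{\n" ++ fmtRange strings strings.length 0 strings.length ++ "\n}"

-- ===== PRECONDITION & SPEC =====
-- Pre_ excludes only the empty list, on which A raises IndexError (it evaluates strings[len(strings)-1] = strings[-1]).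
def Pre_doResponse (strings : List (String × String)) : Prop := strings ≠ []
instance (strings : List (String × String)) : Decidable (Pre_doResponse strings) := by unfold Pre_doResponse; infer_instance
def pvWitness_doResponse : (List (String × String)) := [("a", "b"), ("c", "d")]

def Spec_doResponse (strings : List (String × String)) (out : String) : Prop := out = doResponse_alt strings
instance (strings : List (String × String)) (out : String) : Decidable (Spec_doResponse strings out) := by unfold Spec_doResponse; infer_instance

-- ===== CLAIM (what is proved, stated in full; the proofs are below) =====
def Claim_equal_doResponse : Prop := ∀ (strings : List (String × String)), Dom_doResponse strings → Pre_doResponse strings → Spec_doResponse strings (doResponse strings)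

-- ===== LEMMAS AND PROOFS =====

-- one formatted pair, at the char level
def pairChars (p : String × String) : List Char :=
  "\t\"".toList ++ p.1.toList ++ "\":\"".toList ++ p.2.toList ++ "\"".toList

-- the ",\n"-join of a list of char chunks
def joinChars : List (List Char) → List Char
  | [] => []
  | [s] => s
  | s :: t :: ts => s ++ ",\n".toList ++ joinChars (t :: ts)

lemma joinChars_append (l₁ l₂ : List (List Char)) (h₁ : l₁ ≠ []) (h₂ : l₂ ≠ []) :
    joinChars (l₁ ++ l₂) = joinChars l₁ ++ ",\n".toList ++ joinChars l₂ := by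
  induction l₁ with
  | nil => exact absurd rfl h₁
  | cons s l₁ ih =>
    cases l₁ with
    | nil =>
      cases l₂ with
      | nil => exact absurd rfl h₂
      | cons t ts => simp [joinChars]
    | cons s' l₁' =>
      have hthis := ih (by simp)
      simp only [List.cons_append] at hthis
      simp [joinChars, hthis, List.append_assoc]

-- A's loop read off a list presented as xs ++ ys: a range of length xs.length visits exactly xs.
lemma pv_foldl_range_getD_append {α β : Type} (f : β → α → β) (d : α) :
    ∀ (xs ys : List α) (init : β),
      (PySem.List.pyRange 0 (xs.length : Int) 1).foldl
        (fun r i => f r (PySem.List.pyGetD (xs ++ ys) i d)) init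
      = xs.foldl f init := by
  intro xs
  induction xs using List.reverseRecOn with
  | nil => intro ys init; simp [PySem.List.pyRange_one_eq_nil]
  | append_singleton zs z ih =>
    intro ys init
    have hlen : (((zs ++ [z]).length : Nat) : Int) = (zs.length : Int) + 1 := by simp
    rw [hlen, PySem.List.pyRange_one_succ_right (by positivity), List.foldl_append,
        List.append_assoc, List.singleton_append]
    rw [ih (z :: ys) init]
    have hget : PySem.List.pyGetD (zs ++ z :: ys) ((zs.length : Nat) : Int) d = z := by
      rw [PySem.List.pyGetD_natCast]
      simp
    simp only [List.foldl_cons, List.foldl_nil, hget, List.foldl_append]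

-- pushing toList through A's string-building fold
lemma pv_toList_foldl :
    ∀ (xs : List (String × String)) (acc : String),
      (xs.foldl (fun r q => r ++ "\t\"" ++ q.1 ++ "\":\"" ++ q.2 ++ "\",\n") acc).toList
      = (xs.map pairChars).foldl (fun r g => r ++ g ++ ",\n".toList) acc.toList := by
  intro xs
  induction xs with
  | nil => intro acc; simp
  | cons q xs ih =>
    intro acc
    rw [List.foldl_cons, ih, List.map_cons, List.foldl_cons]
    congr 1
    simp [pairChars, List.append_assoc]

-- A's char-level accumulator, closed off with the last chunk, is a join
lemma pv_chars_loop :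
    ∀ (gs : List (List Char)) (last : List Char) (acc : List Char),
      gs.foldl (fun r g => r ++ g ++ ",\n".toList) acc ++ last
      = acc ++ joinChars (gs ++ [last]) := by
  intro gs
  induction gs with
  | nil => intro last acc; simp [joinChars]
  | cons g gs ih =>
    intro last acc
    rcases h : gs ++ [last] with _ | ⟨b, bs⟩
    · exact absurd h (by simp)
    · rw [List.foldl_cons, ih, List.cons_append, h]
      simp [joinChars, List.append_assoc]

-- B's divide and conquer formats exactly the slice strings[lo:hi]
lemma pv_fmt_eq (s : List (String × String)) :
    ∀ (fuel lo hi : Nat), hi - lo ≤ fuel → lo < hi → hi ≤ s.length →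
      (fmtRange s fuel lo hi).toList = joinChars (((s.drop lo).take (hi - lo)).map pairChars) := by
  intro fuel
  induction fuel with
  | zero => intro lo hi hn hlt; omega
  | succ fuel ih =>
    intro lo hi hn hlt hle
    rw [fmtRange]
    by_cases h1 : hi - lo = 1
    · rw [if_pos h1]
      have hlo : lo < s.length := by omega
      have htake : (s.drop lo).take (hi - lo) = [s[lo]] := by
        rw [h1, List.drop_eq_getElem_cons hlo, List.take_succ_cons, List.take_zero]
      have hget : PySem.List.pyGetD s ((lo : Nat) : Int) ("", "") = s[lo] := by
        rw [PySem.List.pyGetD_natCast, List.getD_eq_getElem?_getD, List.getElem?_eq_getElem hlo]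
        rfl
      rw [htake]
      simp [joinChars, pairChars, hget]
    · have h2 : lo < hi := hlt
      rw [if_neg h1, if_pos h2]
      have hml : lo < (lo + hi) / 2 := by omega
      have hmh : (lo + hi) / 2 < hi := by omega
      rw [String.toList_append, String.toList_append,
          ih lo ((lo + hi) / 2) (by omega) hml (by omega),
          ih ((lo + hi) / 2) hi (by omega) hmh hle]
      have hsplit : (s.drop lo).take (hi - lo)
          = (s.drop lo).take ((lo + hi) / 2 - lo) ++ (s.drop ((lo + hi) / 2)).take (hi - (lo + hi) / 2) := by
        have h3 : lo ≤ (lo + hi) / 2 := by omega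
        rw [show hi - lo = ((lo + hi) / 2 - lo) + (hi - (lo + hi) / 2) by omega, List.take_add,
            List.drop_drop, show lo + ((lo + hi) / 2 - lo) = (lo + hi) / 2 by omega]
      have hne1 : ((s.drop lo).take ((lo + hi) / 2 - lo)).map pairChars ≠ [] := by
        have : ((s.drop lo).take ((lo + hi) / 2 - lo)).length = (lo + hi) / 2 - lo := by
          rw [List.length_take, List.length_drop]; omega
        intro hc
        rw [List.map_eq_nil_iff] at hc
        rw [hc] at this
        simp at this
        omega
      have hne2 : ((s.drop ((lo + hi) / 2)).take (hi - (lo + hi) / 2)).map pairChars ≠ [] := by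
        have : ((s.drop ((lo + hi) / 2)).take (hi - (lo + hi) / 2)).length = hi - (lo + hi) / 2 := by
          rw [List.length_take, List.length_drop]; omega
        intro hc
        rw [List.map_eq_nil_iff] at hc
        rw [hc] at this
        simp at this
        omega
      rw [hsplit, List.map_append, joinChars_append _ _ hne1 hne2]

lemma pv_main (xs : List (String × String)) (p : String × String) :
    doResponse (xs ++ [p]) = doResponse_alt (xs ++ [p]) := by
  unfold doResponse doResponse_alt
  have hlen : (((xs ++ [p]).length : Nat) : Int) - 1 = ((xs.length : Nat) : Int) := by simp
  simp only [hlen]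
  have hget : PySem.List.pyGet? (xs ++ [p]) ((xs.length : Nat) : Int) = some p := by
    simp [PySem.List.pyGet?, PySem.List.pyIdx?]
  rw [hget]
  rw [pv_foldl_range_getD_append (fun r (q : String × String) => r ++ "\t\"" ++ q.1 ++ "\":\"" ++ q.2 ++ "\",\n") ("", "") xs [p]]
  apply String.toList_inj.mp
  simp only [String.toList_append]
  rw [pv_toList_foldl]
  rw [pv_fmt_eq (xs ++ [p]) (xs ++ [p]).length 0 (xs ++ [p]).length le_rfl (by simp) le_rfl]
  simp only [List.drop_zero, List.take_length, Nat.sub_zero]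
  have hjoin := pv_chars_loop (xs.map pairChars) (pairChars p) ("{\n".toList)
  have hmap : (xs ++ [p]).map pairChars = xs.map pairChars ++ [pairChars p] := by simp
  rw [hmap, ← hjoin]
  simp only [pairChars, List.append_assoc]
  rw [show ("\"\n".toList ++ "}".toList : List Char) = "\"".toList ++ "\n}".toList from rfl]

-- ===== VERDICT (by name: the statement is the Claim_ definition above) =====
theorem doResponse_spec : Claim_equal_doResponse := by
  intro strings _ hpre
  unfold Spec_doResponse
  rcases List.eq_nil_or_concat strings with h | ⟨xs, p, rfl⟩
  · exact absurd h hpre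
  · rw [List.concat_eq_append]; exact pv_main xs p
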